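-- pv_equiv track=rewrite | github.com/anan-ya-y/advent-of-code | src_2024/day17.py | before
-- ===== SOURCE A (Python) =====
-- def before(a, b):
--     if len(a) < len(b):
--         return True
--     if len(a) > len(b):
--         return False
--     # lengths are equal.
--     for i in range(len(a)-1, -1, -1):
--         if a[i] < b[i]:
--             return True
--         if a[i] > b[i]:
--             return False
--     return True
-- ===== SOURCE B (Python) =====
-- def before(a, b):
--     if len(a) != len(b):
--         return len(a) < len(b)
--     # single forward pass: remember the verdict of the LAST differing position,
--     # which is exactly the one A's backward scan reaches first; ties give True
--     res = True
--     for x, y in zip(a, b):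
--         if x != y:
--             res = x < y
--     return res
-- ===== Notes on version B (the rewrite author's own statement) =====
-- stated objective: alternative
-- what changed: Replaces the backward early-exit index loop with a single forward pass over zip(a, b) that keeps an accumulator holding the comparison at the last differing position (the position A's backward scan decides on), defaulting to True on full equality.
import Mathlib
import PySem

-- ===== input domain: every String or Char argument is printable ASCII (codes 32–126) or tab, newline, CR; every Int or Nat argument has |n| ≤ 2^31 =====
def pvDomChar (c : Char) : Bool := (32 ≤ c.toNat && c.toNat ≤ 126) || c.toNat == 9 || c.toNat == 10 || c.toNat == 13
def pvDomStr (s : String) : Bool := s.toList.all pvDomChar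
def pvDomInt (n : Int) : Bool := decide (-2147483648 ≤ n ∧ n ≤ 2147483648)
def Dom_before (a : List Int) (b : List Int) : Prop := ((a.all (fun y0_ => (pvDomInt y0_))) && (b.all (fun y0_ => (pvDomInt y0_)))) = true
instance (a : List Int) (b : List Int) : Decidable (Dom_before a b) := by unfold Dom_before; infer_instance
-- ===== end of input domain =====

-- B replaces A's backward early-exit index loop by one forward fold over zip(a,b)
-- keeping the verdict of the last differing position; proved equal on all inputs.


-- ===== PORT A =====
-- the 'for i in range(len(a)-1, -1, -1)' loop, over the list of indices;
-- the 'none' arms are unreachable (the loop runs only when len a = len b, all indices in range)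
def beforeLoop (a : List Int) (b : List Int) : List Int → Bool
  | [] => true
  | i :: rest =>
    match PySem.List.pyGet? a i, PySem.List.pyGet? b i with
    | some x, some y =>
        if x < y then true
        else if y < x then false
        else beforeLoop a b rest
    | _, _ => true

def before (a : List Int) (b : List Int) : Bool :=
  if a.length < b.length then true
  else if b.length < a.length then false
  else beforeLoop a b (PySem.List.pyRange ((a.length : Int) - 1) (-1) (-1))

-- ===== PORT B =====
-- forward pass over zip(a,b): the accumulator remembers the comparison at the
-- last differing position, starting from True (full equality)
def before_alt (a : List Int) (b : List Int) : Bool :=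
  if a.length ≠ b.length then decide (a.length < b.length)
  else (a.zip b).foldl (fun res p => if p.1 ≠ p.2 then decide (p.1 < p.2) else res) true

-- ===== PRECONDITION & SPEC =====
def Spec_before (a : List Int) (b : List Int) (out : Bool) : Prop := out = before_alt a b
instance (a : List Int) (b : List Int) (out : Bool) : Decidable (Spec_before a b out) := by unfold Spec_before; infer_instance

-- ===== CLAIM (what is proved, stated in full; the proofs are below) =====
def Claim_equal_before : Prop := ∀ (a : List Int) (b : List Int), Dom_before a b → Spec_before a b (before a b)

-- ===== LEMMAS AND PROOFS =====

-- proof-side intermediate: lexicographic ≤ on lists of ints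
def pyLexLe : List Int → List Int → Bool
  | [], _ => true
  | _ :: _, [] => false
  | x :: xs, y :: ys =>
      if x < y then true
      else if y < x then false
      else pyLexLe xs ys

theorem pyLexLe_refl (l : List Int) : pyLexLe l l = true := by
  induction l with
  | nil => rfl
  | cons x xs ih => simp [pyLexLe, ih]

-- the descending index list [n-1, ..., 0]
def descList : Nat → List Int
  | 0 => []
  | n + 1 => (n : Int) :: descList n

theorem pyRange_descList (n : Nat) :
    PySem.List.pyRange ((n : Int) - 1) (-1) (-1) = descList n := by
  induction n with
  | zero => simp [descList]
  | succ n ih =>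
    rw [show ((n + 1 : Nat) : Int) - 1 = (n : Int) by push_cast; ring,
        PySem.List.pyRange_neg_one_cons (by omega)]
    simp [descList, ih]

theorem mem_descList {i : Int} {n : Nat} (h : i ∈ descList n) : 0 ≤ i ∧ i < n := by
  induction n with
  | zero => simp [descList] at h
  | succ n ih =>
    rcases (by simpa [descList] using h : i = (n : Int) ∨ i ∈ descList n) with h' | h'
    · omega
    · have := ih h'; omega

theorem beforeLoop_congr (a a' b b' : List Int) (idxs : List Int)
    (h : ∀ i ∈ idxs, PySem.List.pyGet? a i = PySem.List.pyGet? a' i ∧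
                     PySem.List.pyGet? b i = PySem.List.pyGet? b' i) :
    beforeLoop a b idxs = beforeLoop a' b' idxs := by
  induction idxs with
  | nil => rfl
  | cons i rest ih =>
    obtain ⟨ha, hb⟩ := h i (by simp)
    simp only [beforeLoop, ha, hb]
    cases PySem.List.pyGet? a' i with
    | none => rfl
    | some x =>
      cases PySem.List.pyGet? b' i with
      | none => rfl
      | some y =>
        by_cases h1 : x < y <;> by_cases h2 : y < x <;>
          simp [h1, h2, ih (fun j hj => h j (List.mem_cons_of_mem _ hj))]

theorem pyGet?_append_singleton_left (p : List Int) (x : Int) (i : Int)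
    (h0 : 0 ≤ i) (h1 : i < p.length) :
    PySem.List.pyGet? (p ++ [x]) i = PySem.List.pyGet? p i := by
  obtain ⟨n, rfl⟩ : ∃ n : Nat, i = (n : Int) := ⟨i.toNat, by omega⟩
  have hn : n < p.length := by exact_mod_cast h1
  simp [List.getElem?_append_left hn]

theorem beforeLoop_reverse (ra rb : List Int) (hlen : ra.length = rb.length) :
    beforeLoop ra.reverse rb.reverse (descList ra.length) = pyLexLe ra rb := by
  induction ra generalizing rb with
  | nil =>
    cases rb with
    | nil => rfl
    | cons y ys => simp at hlen
  | cons x xs ih =>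
    cases rb with
    | nil => simp at hlen
    | cons y ys =>
      have hxy : xs.length = ys.length := by simpa using hlen
      have hax : PySem.List.pyGet? (x :: xs).reverse ((xs.length : Int)) = some x := by
        simp
      have hby : PySem.List.pyGet? (y :: ys).reverse ((xs.length : Int)) = some y := by
        rw [hxy]; simp
      show beforeLoop (x :: xs).reverse (y :: ys).reverse ((xs.length : Int) :: descList xs.length) = _
      simp only [beforeLoop, hax, hby]
      by_cases h1 : x < y
      · simp [pyLexLe, h1]
      · by_cases h2 : y < x
        · simp [pyLexLe, h1, h2]
        · have hcongr : beforeLoop (xs.reverse ++ [x]) (ys.reverse ++ [y]) (descList xs.length)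
              = beforeLoop xs.reverse ys.reverse (descList xs.length) := by
            apply beforeLoop_congr
            intro i hi
            have hb := mem_descList hi
            constructor
            · exact pyGet?_append_singleton_left xs.reverse x i hb.1 (by simpa using hb.2)
            · exact pyGet?_append_singleton_left ys.reverse y i hb.1 (by simp; omega)
          simp [pyLexLe, h1, h2, hcongr, ih ys hxy]

-- appending one element to equal-length lists: the appended pair decides ties
theorem pyLexLe_append_singleton (p q : List Int) (x y : Int) (h : p.length = q.length) :
    pyLexLe (p ++ [x]) (q ++ [y])
      = if p = q then (if x = y then true else decide (x < y)) else pyLexLe p q := by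
  induction p generalizing q with
  | nil =>
    cases q with
    | nil =>
      by_cases h1 : x < y <;> by_cases h2 : y < x <;>
        simp [pyLexLe, h1, h2] <;> omega
    | cons v vs => simp at h
  | cons u us ih =>
    cases q with
    | nil => simp at h
    | cons v vs =>
      have hlen : us.length = vs.length := by simpa using h
      by_cases h1 : u < v
      · simp [pyLexLe, h1, show ¬ u = v by omega]
      · by_cases h2 : v < u
        · simp [pyLexLe, h1, h2, show ¬ u = v by omega]
        · have huv : u = v := by omega
          simp [pyLexLe, huv, ih vs hlen]

-- the forward fold computes the last-differing-position verdict
theorem fold_lastdiff (a : List Int) (b : List Int) (init : Bool) (h : a.length = b.length) :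
    (a.zip b).foldl (fun res p => if p.1 ≠ p.2 then decide (p.1 < p.2) else res) init
      = if a = b then init else pyLexLe a.reverse b.reverse := by
  induction a generalizing b init with
  | nil =>
    cases b with
    | nil => simp
    | cons y ys => simp at h
  | cons x xs ih =>
    cases b with
    | nil => simp at h
    | cons y ys =>
      have hlen : xs.length = ys.length := by simpa using h
      have hrev : (xs.reverse = ys.reverse) = (xs = ys) := by
        simp [List.reverse_inj]
      simp only [List.zip_cons_cons, List.foldl_cons]
      rw [ih ys _ hlen]
      have happ := pyLexLe_append_singleton xs.reverse ys.reverse x y (by simp [hlen])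
      simp only [List.reverse_cons, happ, hrev]
      by_cases hxs : xs = ys <;> by_cases hxy : x = y <;>
        simp [hxs, hxy]

-- ===== VERDICT (by name: the statement is the Claim_ definition above) =====
theorem before_spec : Claim_equal_before := by
  intro a b _
  unfold Spec_before before before_alt
  rcases lt_trichotomy a.length b.length with h | h | h
  · rw [if_pos h, if_pos (by omega : a.length ≠ b.length)]
    simp [h]
  · rw [if_neg (by omega : ¬ a.length < b.length),
        if_neg (by omega : ¬ b.length < a.length),
        if_neg (by omega : ¬ a.length ≠ b.length), pyRange_descList]
    have hA' : beforeLoop a b (descList a.length) = pyLexLe a.reverse b.reverse := by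
      simpa using beforeLoop_reverse a.reverse b.reverse (by simp [h])
    rw [hA', fold_lastdiff a b true h]
    by_cases hab : a = b <;> simp [hab, pyLexLe_refl]
  · rw [if_neg (by omega : ¬ a.length < b.length), if_pos h,
        if_pos (by omega : a.length ≠ b.length)]
    simp [Nat.lt_asymm h]
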